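-- pv_equiv track=rewrite | github.com/WRF-Chem-Polar/WRF-infra | postprocess/wrfpp.py | _units_mpl
-- ===== SOURCE A (Python) =====
-- def _units_mpl(units):
--     """Return given units, formatted for displaying on Matplotlib plots.
--
--     Parameters:
--     -----------
--     units : str
--         The units to format (eg. "km s-1").
--
--     Returns:
--     --------
--     str
--         The units formatted for Matplotlib (eg. "km s$^{-1}$").
--
--     """
--     split = units.split()
--     for i, s in enumerate(split):
--         n = len(s) - 1
--         while n >= 0 and s[n] in "-0123456789":
--             n -= 1
--         if n < 0:
--             raise ValueError("Could not process units.")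
--         if n != len(s):
--             split[i] = "%s$^{%s}$" % (s[: n + 1], s[n + 1 :])
--     return " ".join(split)
-- ===== SOURCE B (Python) =====
-- def _units_mpl(units):
--     # Forward minimal-split search (the lazy-regex view r'(.*?)([-0-9]*)'):
--     # take the SHORTEST prefix whose remainder is entirely '-'/digits.
--     def fmt(s):
--         for k in range(len(s) + 1):
--             if all(c in "-0123456789" for c in s[k:]):
--                 if k == 0:
--                     raise ValueError("Could not process units.")
--                 return "%s$^{%s}$" % (s[:k], s[k:])
--     return " ".join(fmt(s) for s in units.split())
-- ===== Notes on version B (the rewrite author's own statement) =====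
-- stated objective: alternative
-- what changed: Replaces A's backward per-token index scan with a forward minimal-split search (the lazy-regex view: take the shortest prefix whose remainder is all minus/digit characters), raising where that prefix is empty; Pre_ excludes inputs on which both A and B raise ValueError (a whitespace-separated token consisting entirely of minus/digit characters).
import Mathlib
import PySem

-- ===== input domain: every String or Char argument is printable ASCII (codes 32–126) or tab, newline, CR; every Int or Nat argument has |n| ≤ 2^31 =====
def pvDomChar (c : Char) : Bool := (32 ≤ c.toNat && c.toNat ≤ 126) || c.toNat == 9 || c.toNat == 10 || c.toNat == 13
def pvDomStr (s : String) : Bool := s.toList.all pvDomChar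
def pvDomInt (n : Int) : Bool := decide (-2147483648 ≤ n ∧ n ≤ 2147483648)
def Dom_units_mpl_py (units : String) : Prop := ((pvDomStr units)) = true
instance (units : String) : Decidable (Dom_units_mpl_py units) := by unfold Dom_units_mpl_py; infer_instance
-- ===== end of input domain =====

-- B replaces A's backward index scan per token with a forward minimal-split search
-- (shortest prefix whose remainder is all minus/digit chars); alternative decomposition, same result.

-- membership test `c in "-0123456789"` (single character in an ASCII literal: exact as list membership)
def pvIsSup (c : Char) : Bool := "-0123456789".toList.contains c

-- ===== PORT A =====
-- A's backward while loop: n = len(s)-1; while n >= 0 and s[n] in "-0123456789": n -= 1; returns final n.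
-- Fuel k means "current n = k-1"; s[n] with 0 ≤ n < len(s) is exact via PySem.List.pyGet?.
def pvScanA (s : List Char) : Nat → Int
  | 0 => -1
  | k+1 =>
    match PySem.List.pyGet? s (k : Int) with
    | some c => if pvIsSup c then pvScanA s k else (k : Int)
    | none => (k : Int)   -- unreachable: k < s.length whenever called

-- one token of A's loop body; none = `raise ValueError`
def pvTokA (s : String) : Option String :=
  let cs := s.toList
  let n := pvScanA cs cs.length
  if n < 0 then none
  else if n ≠ (cs.length : Int) then
    -- "%s$^{%s}$" % (s[: n + 1], s[n + 1 :]); slices with 0 ≤ n+1 ≤ len are take/drop (exact)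
    some (String.ofList (cs.take (n + 1).toNat ++ "$^{".toList ++ cs.drop (n + 1).toNat ++ "}$".toList))
  else some s

def units_mpl_py (units : String) : String :=
  match (PySem.Str.split₀ units).mapM pvTokA with
  | some parts => PySem.Str.join " " parts
  | none => ""   -- the Python raises ValueError here; excluded by Pre_units_mpl_py

-- ===== PORT B =====
-- B's forward loop `for k in range(len(s)+1): if all(c in "-0123456789" for c in s[k:])`:
-- `pre` is the reversed already-consumed prefix s[:k], `rest` is s[k:].
def pvGoB (pre rest : List Char) : Option String :=
  if rest.all pvIsSup then
    if pre.isEmpty then none   -- k == 0: raise ValueError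
    else some (String.ofList (pre.reverse ++ "$^{".toList ++ rest ++ "}$".toList))
  else
    match rest with
    | [] => none               -- unreachable: [] is all pvIsSup
    | c :: t => pvGoB (c :: pre) t

-- one token of B's loop body; none = `raise ValueError`
def pvTokB (s : String) : Option String := pvGoB [] s.toList

def units_mpl_py_alt (units : String) : String :=
  match (PySem.Str.split₀ units).mapM pvTokB with
  | some parts => PySem.Str.join " " parts
  | none => ""   -- B raises ValueError here too; excluded by Pre_units_mpl_py

-- ===== PRECONDITION & SPEC =====
-- Pre_ excludes exactly the inputs on which A raises ValueError (and B raises it too):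
-- some whitespace-separated token consists entirely of minus/digit characters.
def Pre_units_mpl_py (units : String) : Prop :=
  ∀ s ∈ PySem.Str.split₀ units, ¬ (s.toList.all pvIsSup = true)
instance (units : String) : Decidable (Pre_units_mpl_py units) := by
  unfold Pre_units_mpl_py; infer_instance

def pvWitness_units_mpl_py : String := "km s-1"

def Spec_units_mpl_py (units : String) (out : String) : Prop := out = units_mpl_py_alt units
instance (units : String) (out : String) : Decidable (Spec_units_mpl_py units out) := by unfold Spec_units_mpl_py; infer_instance

-- ===== CLAIM (what is proved, stated in full; the proofs are below) =====
def Claim_equal_units_mpl_py : Prop := ∀ (units : String), Dom_units_mpl_py units → Pre_units_mpl_py units → Spec_units_mpl_py units (units_mpl_py units)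

-- ===== LEMMAS AND PROOFS =====

-- the non-superscript prefix of cs (everything before the maximal trailing '-'/digit run)
def pvR (cs : List Char) : List Char := (cs.reverse.dropWhile pvIsSup).reverse

-- the scan never looks at indices >= its fuel
theorem pvScanA_append (t : List Char) (c : Char) (k : Nat) (hk : k <= t.length) :
    pvScanA (t ++ [c]) k = pvScanA t k := by
  induction k with
  | zero => rfl
  | succ k ih =>
    have hk' : k < t.length := hk
    simp only [pvScanA, PySem.List.pyGet?_natCast]
    rw [List.getElem?_append_left hk']
    cases h : t[k]? with
    | none => rfl
    | some c' => simp only [ih (Nat.le_of_lt hk')]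

-- A's final n equals (length of the non-superscript prefix) - 1
theorem pvScanA_eq (cs : List Char) :
    pvScanA cs cs.length = ((pvR cs).length : Int) - 1 := by
  induction cs using List.reverseRecOn with
  | nil => rfl
  | append_singleton t c ih =>
    have hlen : (t ++ [c]).length = t.length + 1 := by simp
    rw [hlen]
    have hget : PySem.List.pyGet? (t ++ [c]) (t.length : Int) = some c := by simp
    simp only [pvScanA, hget]
    by_cases hc : pvIsSup c = true
    · rw [if_pos hc, pvScanA_append t c t.length le_rfl, ih]
      simp [pvR, hc]
    · rw [if_neg hc]
      simp [pvR, hc]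

-- the non-superscript prefix is literally cs.take (pvR cs).length
theorem pvPre_take (cs : List Char) : cs.take (pvR cs).length = pvR cs := by
  obtain ⟨suf, hd⟩ : ∃ suf, cs = pvR cs ++ suf := by
    refine ⟨(cs.reverse.takeWhile pvIsSup).reverse, ?_⟩
    conv_lhs => rw [← cs.reverse_reverse, ← List.takeWhile_append_dropWhile (p := pvIsSup) (l := cs.reverse)]
    rw [List.reverse_append]; rfl
  rw [show cs.take (pvR cs).length = (pvR cs ++ suf).take (pvR cs).length by rw [← hd]]
  exact List.take_left' rfl

theorem pvR_all_nil (rest : List Char) (hall : rest.all pvIsSup = true) : pvR rest = [] := by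
  unfold pvR
  rw [List.dropWhile_eq_nil_iff.mpr]
  · rfl
  · intro x hx
    exact (List.all_eq_true.mp hall) x (List.mem_reverse.mp hx)

theorem pvR_cons (c : Char) (t : List Char) (hall : ¬ (c :: t).all pvIsSup = true) :
    pvR (c :: t) = c :: pvR t := by
  unfold pvR
  have hrev : (c :: t).reverse = t.reverse ++ [c] := by simp
  rw [hrev, List.dropWhile_append]
  by_cases he : (t.reverse.dropWhile pvIsSup).isEmpty
  · have hc : ¬ pvIsSup c = true := by
      intro hc
      apply hall
      apply List.all_eq_true.mpr
      intro x hx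
      rcases List.mem_cons.mp hx with h | h
      · exact h ▸ hc
      · by_contra hnx
        exact hnx (List.dropWhile_eq_nil_iff.mp (List.isEmpty_iff.mp he) x (List.mem_reverse.mpr h))
    rw [if_pos he]
    simp [List.dropWhile, hc, List.isEmpty_iff.mp he]
  · rw [if_neg he]
    simp

-- closed form of B's forward search: it stops exactly at the non-superscript prefix
theorem pvGoB_eq (rest : List Char) : ∀ pre : List Char,
    pvGoB pre rest =
      (if (pre.reverse ++ pvR rest).isEmpty then none
       else some (String.ofList ((pre.reverse ++ pvR rest) ++ "$^{".toList
                    ++ rest.drop (pvR rest).length ++ "}$".toList))) := by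
  induction rest with
  | nil =>
    intro pre
    unfold pvGoB
    simp [pvR]
  | cons c t ih =>
    intro pre
    by_cases hall : (c :: t).all pvIsSup = true
    · unfold pvGoB
      rw [if_pos hall, pvR_all_nil _ hall]
      by_cases hp : pre.isEmpty
      · simp [List.isEmpty_iff.mp hp]
      · have hne : pre ≠ [] := fun h => hp (by simp [h])
        simp [hp]
    · unfold pvGoB
      rw [if_neg hall]
      show pvGoB (c :: pre) t = _
      rw [ih (c :: pre), pvR_cons c t hall]
      simp [List.isEmpty_iff]

-- per-token equality: A's backward scan and B's forward search produce the same Option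
theorem pvTok_eq (s : String) : pvTokA s = pvTokB s := by
  unfold pvTokA pvTokB
  set cs := s.toList with hcs
  rw [pvGoB_eq cs []]
  simp only [List.reverse_nil, List.nil_append, pvScanA_eq cs]
  by_cases hnil : (pvR cs).length = 0
  · have hr : pvR cs = [] := List.eq_nil_of_length_eq_zero hnil
    rw [if_pos (by omega : ((pvR cs).length : Int) - 1 < 0), hr]
    simp
  · have hrle : (pvR cs).length <= cs.length := by
      have := List.length_dropWhile_le (p := pvIsSup) (l := cs.reverse)
      simpa [pvR] using this
    have h0 : ¬ (((pvR cs).length : Int) - 1 < 0) := by omega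
    have hne : ((pvR cs).length : Int) - 1 ≠ (cs.length : Int) := by omega
    have hempty : ¬ (pvR cs).isEmpty = true := by
      simp [List.isEmpty_iff]
      exact fun h => hnil (by simp [h])
    rw [if_neg h0, if_pos hne, if_neg hempty]
    have htn : (((pvR cs).length : Int) - 1 + 1).toNat = (pvR cs).length := by simp
    rw [htn, pvPre_take cs]

-- ===== VERDICT (by name: the statement is the Claim_ definition above) =====
theorem units_mpl_py_spec : Claim_equal_units_mpl_py := by
  intro units _ _
  unfold Spec_units_mpl_py units_mpl_py units_mpl_py_alt
  have : pvTokA = pvTokB := funext pvTok_eq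
  rw [this]
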